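-- pv_equiv track=rewrite | github.com/irzaip/cipichatbot | chat_wordvec.py | rem_list
-- ===== SOURCE A (Python) =====
-- def rem_list(inputlist):
--     """from a list, remove from remlist in this function"""
--     remlist = ['LePastee','Tertawalah','Campari','Gundik','mastektomi', 'Kerut', 'Ssshh', 'RT']
--     for i in remlist:
--         try:
--             ind = inputlist.index(i)
--             inputlist.pop(ind)
--         except:
--             pass
--     return inputlist
-- ===== SOURCE B (Python) =====
-- def rem_list(inputlist):
--     """from a list, remove from remlist in this function"""
--     pending = {'LePastee', 'Tertawalah', 'Campari', 'Gundik', 'mastektomi', 'Kerut', 'Ssshh', 'RT'}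
--     result = []
--     for x in inputlist:
--         if x in pending:
--             pending.discard(x)  # drop only the first occurrence of each word
--         else:
--             result.append(x)
--     inputlist[:] = result  # mutate in place, like A
--     return inputlist
-- ===== Notes on version B (the rewrite author's own statement) =====
-- stated objective: idiomatic
-- what changed: Instead of eight repeated list.index/pop scans over the list, B makes a single pass over the input with a set of still-pending blacklist words, skipping the first occurrence of each, and writes the filtered result back in place.
import Mathlib
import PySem

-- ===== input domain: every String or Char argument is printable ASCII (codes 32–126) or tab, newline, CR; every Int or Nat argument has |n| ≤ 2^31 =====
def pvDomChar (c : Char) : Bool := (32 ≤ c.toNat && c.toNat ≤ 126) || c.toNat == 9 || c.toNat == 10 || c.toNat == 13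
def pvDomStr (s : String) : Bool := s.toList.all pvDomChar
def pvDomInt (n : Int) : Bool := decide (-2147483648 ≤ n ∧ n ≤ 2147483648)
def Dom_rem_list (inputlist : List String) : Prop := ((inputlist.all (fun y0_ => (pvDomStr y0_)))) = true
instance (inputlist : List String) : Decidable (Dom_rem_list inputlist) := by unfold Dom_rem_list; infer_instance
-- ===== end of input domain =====

-- B replaces A's eight repeated list.index/pop scans by one pass with a set of pending
-- blacklist words (objective: idiomatic). Both A and B mutate the argument list in place
-- to the same final contents; the equivalence proved here is about the returned value.


-- ===== PORT A =====
-- remlist = ['LePastee','Tertawalah','Campari','Gundik','mastektomi','Kerut','Ssshh','RT']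
def remlistA : List String :=
  ["LePastee", "Tertawalah", "Campari", "Gundik", "mastektomi", "Kerut", "Ssshh", "RT"]

-- one iteration of A's loop body: try ind = inputlist.index(i); inputlist.pop(ind) except pass
def remStepA (l : List String) (i : String) : List String :=
  match PySem.List.index? l i with
  | some ind =>
      match PySem.List.pop? l (ind : Int) with
      | some r => r.2
      | none => l          -- unreachable: index? returns a valid index
  | none => l              -- ValueError from .index → except: pass

def rem_list (inputlist : List String) : List String :=
  remlistA.foldl remStepA inputlist

-- ===== PORT B =====
def remlistB : PySem.Set String :=
  PySem.Set.ofList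
    ["LePastee", "Tertawalah", "Campari", "Gundik", "mastektomi", "Kerut", "Ssshh", "RT"]

-- one pass: skip an element the first time it is seen pending, keep everything else
def remGoB (pending : PySem.Set String) : List String → List String
  | [] => []
  | x :: xs =>
      if PySem.Set.contains pending x then remGoB (PySem.Set.discard pending x) xs
      else x :: remGoB pending xs

def rem_list_alt (inputlist : List String) : List String :=
  remGoB remlistB inputlist

-- ===== PRECONDITION & SPEC =====
def Spec_rem_list (inputlist : List String) (out : List String) : Prop := out = rem_list_alt inputlist
instance (inputlist : List String) (out : List String) : Decidable (Spec_rem_list inputlist out) := by unfold Spec_rem_list; infer_instance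

-- ===== CLAIM (what is proved, stated in full; the proofs are below) =====
def Claim_equal_rem_list : Prop := ∀ (inputlist : List String), Dom_rem_list inputlist → Spec_rem_list inputlist (rem_list inputlist)

-- ===== LEMMAS AND PROOFS =====

-- A's loop body removes the first occurrence of i, if any
theorem remStepA_eq_erase (l : List String) (i : String) :
    remStepA l i = if i ∈ l then l.erase i else l := by
  unfold remStepA
  by_cases h : i ∈ l
  · rcases (PySem.List.index?_isSome_iff l i).2 h with hs
    rcases Option.isSome_iff_exists.1 hs with ⟨k, hk⟩
    have hkl : k < l.length := by
      rcases PySem.List.getElem_of_index?_eq_some (xs := l) (v := i) hk with ⟨hlt, _⟩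
      exact hlt
    simp only [hk, PySem.List.pop?_natCast l k hkl, if_pos h]
    have hidx : l.idxOf? i = some k := by
      simpa [PySem.List.index?_eq_idxOf?] using hk
    rw [List.erase_eq_eraseIdx]
    simp [hidx]
  · rw [(PySem.List.index?_eq_none_iff l i).2 h, if_neg h]

theorem discard_eq_erase (s : List String) (hs : s.Nodup) (x : String) :
    PySem.Set.discard s x = s.erase x := by
  show List.filter (fun y => !y == x) s = s.erase x
  rw [List.Nodup.erase_eq_filter hs]
  apply List.filter_congr
  intro y _
  simp [bne]

-- head step for A's whole fold, for a nodup word list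
theorem foldl_remStepA_cons (ws : List String) (hnd : ws.Nodup) (x : String) (xs : List String) :
    ws.foldl remStepA (x :: xs) =
      if x ∈ ws then (ws.erase x).foldl remStepA xs else x :: ws.foldl remStepA xs := by
  induction ws generalizing xs with
  | nil => simp
  | cons w ws' ih =>
    have hnd' : ws'.Nodup := hnd.of_cons
    by_cases hwx : w = x
    · subst hwx
      have hnot : w ∉ ws' := (List.nodup_cons.1 hnd).1
      have hstep : remStepA (w :: xs) w = xs := by
        rw [remStepA_eq_erase]; simp
      simp [List.foldl_cons, hstep, List.erase_cons_head]
    · have hxw : x ≠ w := fun h => hwx h.symm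
      have hstep : remStepA (x :: xs) w = x :: remStepA xs w := by
        rw [remStepA_eq_erase, remStepA_eq_erase]
        by_cases hw : w ∈ xs
        · simp [hw, hxw]
        · simp [hw, hxw]
      rw [List.foldl_cons, hstep, ih hnd' (remStepA xs w)]
      have hmem : (x ∈ w :: ws') ↔ (x ∈ ws') := by
        constructor
        · intro h; rcases List.mem_cons.1 h with h | h
          · exact absurd h.symm hwx
          · exact h
        · exact fun h => List.mem_cons_of_mem w h
      by_cases hx : x ∈ ws'
      · rw [if_pos hx, if_pos (hmem.2 hx)]
        rw [List.erase_cons_tail (by simp [hwx]), List.foldl_cons]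
      · rw [if_neg hx, if_neg (fun h => hx (hmem.1 h)), List.foldl_cons]

-- A's fold equals B's single pass, for any nodup pending set
theorem foldl_eq_remGoB (xs : List String) :
    ∀ (ws : List String), ws.Nodup → ws.foldl remStepA xs = remGoB ws xs := by
  induction xs with
  | nil =>
    intro ws _
    have : ∀ ws' : List String, ws'.foldl remStepA [] = [] := by
      intro ws'; induction ws' with
      | nil => rfl
      | cons w t ih => simpa [remStepA_eq_erase] using ih
    simpa [remGoB] using this ws
  | cons x xs ih =>
    intro ws hnd
    rw [foldl_remStepA_cons ws hnd x xs]
    by_cases hx : x ∈ ws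
    · rw [if_pos hx, ih (ws.erase x) (hnd.erase x)]
      have hc : PySem.Set.contains ws x = true := (PySem.Set.contains_iff ws x).2 hx
      rw [remGoB, if_pos hc, discard_eq_erase ws hnd x]
    · rw [if_neg hx, ih ws hnd]
      have hc : PySem.Set.contains ws x = false := by
        by_contra h
        exact hx ((PySem.Set.contains_iff ws x).1 (by revert h; cases PySem.Set.contains ws x <;> simp))
      rw [remGoB, hc]
      simp

-- ===== VERDICT (by name: the statement is the Claim_ definition above) =====
theorem rem_list_spec : Claim_equal_rem_list := by
  intro inputlist _
  show rem_list inputlist = rem_list_alt inputlist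
  unfold rem_list rem_list_alt
  have hB : remlistB = remlistA := by decide
  rw [hB]
  exact foldl_eq_remGoB inputlist remlistA (by decide)
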